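-- pv_equiv track=rewrite | github.com/glwlg/X-bot | src/ikaros/dev/acp_client.py | _select_permission_outcome
-- ===== SOURCE A (Python) =====
-- from typing import Any, Dict, List
--
-- def _select_permission_outcome(options: List[Dict[str, Any]]) -> Dict[str, Any]:
--     if not options:
--         return {"outcome": "cancelled"}
--     preferred_kinds = ("allow_once", "allow_always", "reject_once", "reject_always")
--     chosen: Dict[str, Any] | None = None
--     for kind in preferred_kinds:
--         chosen = next(
--             (item for item in options if str(item.get("kind") or "").strip() == kind),
--             None,
--         )
--         if chosen is not None:
--             break
--     if chosen is None:
--         chosen = dict(options[0])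
--     option_id = str(chosen.get("optionId") or "").strip()
--     if not option_id:
--         return {"outcome": "cancelled"}
--     return {"outcome": "selected", "optionId": option_id}
-- ===== SOURCE B (Python) =====
-- from typing import Any, Dict, List
--
-- def _select_permission_outcome(options: List[Dict[str, Any]]) -> Dict[str, Any]:
--     if not options:
--         return {"outcome": "cancelled"}
--     preferred_kinds = ("allow_once", "allow_always", "reject_once", "reject_always")
--
--     def rank(item: Dict[str, Any]) -> int:
--         kind = str(item.get("kind") or "").strip()
--         for i, k in enumerate(preferred_kinds):
--             if k == kind:
--                 return i
--         return len(preferred_kinds)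
--
--     # single-pass argmin: first item with the smallest priority rank;
--     # options[0] stays the fallback when nothing matches any preferred kind
--     best = dict(options[0])
--     best_rank = len(preferred_kinds)
--     for item in options:
--         r = rank(item)
--         if r < best_rank:
--             best, best_rank = item, r
--     option_id = str(best.get("optionId") or "").strip()
--     if not option_id:
--         return {"outcome": "cancelled"}
--     return {"outcome": "selected", "optionId": option_id}
-- ===== Notes on version B (the rewrite author's own statement) =====
-- stated objective: alternative
-- what changed: Replaces A's up-to-four priority-ordered full rescans of options with a single-pass argmin: each item gets a numeric priority rank from the preferred-kind tuple and one loop keeps the first item with the smallest rank, options[0] remaining the fallback when no rank is below 4.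
import Mathlib
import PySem

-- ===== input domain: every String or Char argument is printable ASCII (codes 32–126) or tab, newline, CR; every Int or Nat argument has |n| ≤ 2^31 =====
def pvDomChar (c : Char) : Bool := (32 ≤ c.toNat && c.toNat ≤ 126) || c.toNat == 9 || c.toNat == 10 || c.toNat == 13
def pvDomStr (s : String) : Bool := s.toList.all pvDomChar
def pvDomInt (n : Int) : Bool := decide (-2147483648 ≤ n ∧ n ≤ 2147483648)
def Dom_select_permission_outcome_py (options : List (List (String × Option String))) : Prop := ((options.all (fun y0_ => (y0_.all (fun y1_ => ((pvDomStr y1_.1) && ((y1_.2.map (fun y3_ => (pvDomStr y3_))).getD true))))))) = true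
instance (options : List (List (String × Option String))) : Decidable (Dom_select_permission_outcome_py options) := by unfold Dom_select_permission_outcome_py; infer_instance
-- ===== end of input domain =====

-- B replaces A's up-to-four priority-ordered rescans with a single-pass argmin over a numeric kind rank (alternative structure, same measured cost).

-- shared helper: str(item.get(key) or "").strip()
def pvGetStr (item : List (String × Option String)) (key : String) : String :=
  PySem.Str.strip ((((PySem.Dict.mk item).get? key).join).getD "")

-- ===== PORT A =====
-- the 'for kind in preferred_kinds' loop with its inner 'next(... if ... == kind)' scan and break
def pvFindKind (options : List (List (String × Option String))) :
    List String → Option (List (String × Option String))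
  | [] => none
  | k :: ks =>
    match options.find? (fun item => pvGetStr item "kind" == k) with
    | some it => some it
    | none => pvFindKind options ks

def select_permission_outcome_py (options : List (List (String × Option String))) : List (String × String) :=
  match options with
  | [] => [("outcome", "cancelled")]
  | first :: _ =>
    let chosen := (pvFindKind options ["allow_once", "allow_always", "reject_once", "reject_always"]).getD first
    let option_id := pvGetStr chosen "optionId"
    if option_id = "" then [("outcome", "cancelled")]
    else [("outcome", "selected"), ("optionId", option_id)]

-- ===== PORT B =====
def pvKinds : List String := ["allow_once", "allow_always", "reject_once", "reject_always"]

-- B's rank(item): index of the normalized kind in the preferred tuple, else its length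
def pvRank (item : List (String × Option String)) : Nat :=
  pvKinds.findIdx (fun k => k == pvGetStr item "kind")

def select_permission_outcome_py_alt (options : List (List (String × Option String))) : List (String × String) :=
  match options with
  | [] => [("outcome", "cancelled")]
  | first :: _ =>
    -- single pass keeping (best, best_rank): first item with the smallest rank
    let best :=
      options.foldl
        (fun (b : List (String × Option String) × Nat) item =>
          let r := pvRank item
          if r < b.2 then (item, r) else b)
        (first, pvKinds.length)
    let option_id := pvGetStr best.1 "optionId"
    if option_id = "" then [("outcome", "cancelled")]
    else [("outcome", "selected"), ("optionId", option_id)]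

-- ===== PRECONDITION & SPEC =====
def Spec_select_permission_outcome_py (options : List (List (String × Option String))) (out : List (String × String)) : Prop := out = select_permission_outcome_py_alt options
instance (options : List (List (String × Option String))) (out : List (String × String)) : Decidable (Spec_select_permission_outcome_py options out) := by unfold Spec_select_permission_outcome_py; infer_instance

-- ===== CLAIM (what is proved, stated in full; the proofs are below) =====
def Claim_equal_select_permission_outcome_py : Prop := ∀ (options : List (List (String × Option String))), Dom_select_permission_outcome_py options → Spec_select_permission_outcome_py options (select_permission_outcome_py options)

-- ===== LEMMAS AND PROOFS =====

-- peeling one item off A's nested scan: the head wins exactly on the kinds after its own first match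
theorem pvFindKind_cons (x : List (String × Option String))
    (xs : List (List (String × Option String))) (ks : List String) :
    pvFindKind (x :: xs) ks =
      (if ks.findIdx (fun k => pvGetStr x "kind" == k) < ks.length then
        (pvFindKind xs (ks.take (ks.findIdx (fun k => pvGetStr x "kind" == k)))).or (some x)
      else pvFindKind xs ks) := by
  induction ks with
  | nil => simp [pvFindKind]
  | cons k ks ih =>
    by_cases h : pvGetStr x "kind" = k
    · simp [pvFindKind, List.find?, List.findIdx_cons, h, Option.or]
    · have hb : (pvGetStr x "kind" == k) = false := by simp [h]
      simp only [pvFindKind, List.find?, hb, List.findIdx_cons, cond_false]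
      rw [ih]
      by_cases hlt : ks.findIdx (fun k => pvGetStr x "kind" == k) < ks.length
      · have : ks.findIdx (fun k => pvGetStr x "kind" == k) + 1 < (k :: ks).length := by
          simpa using Nat.succ_lt_succ hlt
        simp only [hlt, if_true, this, if_true, List.take_succ_cons]
        simp only [pvFindKind]
        cases xs.find? (fun item => pvGetStr item "kind" == k) <;> simp
      · have : ¬ (ks.findIdx (fun k => pvGetStr x "kind" == k) + 1 < (k :: ks).length) := by
          simpa using fun h' => hlt h'
        simp only [hlt, if_false, this, if_false]

theorem pvFindKind_nil (ks : List String) :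
    pvFindKind ([] : List (List (String × Option String))) ks = none := by
  induction ks with
  | nil => rfl
  | cons k ks ih => simp [pvFindKind, ih]

-- the single-pass argmin fold equals A's scan restricted to the kinds still beating the accumulator
theorem pvFold_eq_findKind (xs : List (List (String × Option String)))
    (b : List (String × Option String) × Nat) (hb : b.2 ≤ pvKinds.length) :
    (xs.foldl
        (fun (b : List (String × Option String) × Nat) item =>
          let r := pvRank item
          if r < b.2 then (item, r) else b) b).1
      = (pvFindKind xs (pvKinds.take b.2)).getD b.1 := by
  induction xs generalizing b with
  | nil => simp [pvFindKind_nil]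
  | cons x xs ih =>
    have hidx : (pvKinds.take b.2).findIdx (fun k => pvGetStr x "kind" == k)
        = min (pvRank x) b.2 := by
      have hcomm : (fun k => pvGetStr x "kind" == k) = (fun k => k == pvGetStr x "kind") := by
        funext k; exact BEq.comm
      rw [hcomm, List.findIdx_take, pvRank, Nat.min_comm]
    have hlen : (pvKinds.take b.2).length = b.2 := List.length_take_of_le hb
    simp only [List.foldl]
    by_cases hr : pvRank x < b.2
    · have h1 : min (pvRank x) b.2 = pvRank x := Nat.min_eq_left (Nat.le_of_lt hr)
      rw [if_pos hr, ih _ (by simpa using Nat.le_trans (Nat.le_of_lt hr) hb),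
        pvFindKind_cons, hidx, hlen, h1, if_pos hr, List.take_take,
        Nat.min_eq_left (Nat.le_of_lt hr)]
      cases pvFindKind xs (pvKinds.take (pvRank x)) <;> simp [Option.or]
    · have h1 : min (pvRank x) b.2 = b.2 := Nat.min_eq_right (Nat.le_of_not_lt hr)
      rw [if_neg hr, ih _ hb, pvFindKind_cons, hidx, hlen, h1, if_neg (Nat.lt_irrefl _)]

-- ===== VERDICT (by name: the statement is the Claim_ definition above) =====
theorem select_permission_outcome_py_spec : Claim_equal_select_permission_outcome_py := by
  intro options _
  unfold Spec_select_permission_outcome_py select_permission_outcome_py select_permission_outcome_py_alt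
  cases options with
  | nil => rfl
  | cons first rest =>
    simp only [pvFold_eq_findKind _ (first, pvKinds.length) (Nat.le_refl _),
      List.take_length]
    rfl
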